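-- pv_equiv track=rewrite | github.com/rockfox0/crypto | mysql.py | desensitized_string
-- ===== SOURCE A (Python) =====
-- def desensitive_value(value):
--     str_value=str(value)
--     value_length=len(str_value)
--     #计算脱敏部分长度
--     desensitized_length=value_length//2
--     star_position=(value_length-desensitized_length)//2
--     end_position=star_position+desensitized_length
--     desensitized_value=(
--         str_value[:star_position]+'*'* desensitized_length+str_value[end_position:]
--     )
--     return desensitized_value
--
-- def desensitized_string(data,sensitive_fields):
--     desensitized_data=[]
--     for row_index,row in enumerate(data):#enumerate(data)返回元素的索引和值
--         desensitized_row=[]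
--         for column_index,value in enumerate(row):
--             if(row_index , column_index) in sensitive_fields:
--                 desensitized_value=desensitive_value(value)
--                 desensitized_row.append(desensitized_value)
--             else:
--                 desensitized_row.append(value)
--         desensitized_data.append(desensitized_row)
--     return desensitized_data
-- ===== SOURCE B (Python) =====
-- def desensitive_value(value):
--     str_value = str(value)
--     value_length = len(str_value)
--     desensitized_length = value_length // 2
--     star_position = (value_length - desensitized_length) // 2
--     end_position = star_position + desensitized_length
--     return str_value[:star_position] + '*' * desensitized_length + str_value[end_position:]
--
-- def desensitized_string(data, sensitive_fields):
--     result = [list(row) for row in data]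
--     for r, c in sensitive_fields:
--         if 0 <= r < len(data) and 0 <= c < len(data[r]):
--             result[r][c] = desensitive_value(data[r][c])
--     return result
-- ===== Notes on version B (the rewrite author's own statement) =====
-- stated objective: faster
-- what changed: Instead of testing every cell for membership in sensitive_fields, B copies the grid once and writes the masked value directly at each in-bounds sensitive position, reading from the original grid.
import Mathlib
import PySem

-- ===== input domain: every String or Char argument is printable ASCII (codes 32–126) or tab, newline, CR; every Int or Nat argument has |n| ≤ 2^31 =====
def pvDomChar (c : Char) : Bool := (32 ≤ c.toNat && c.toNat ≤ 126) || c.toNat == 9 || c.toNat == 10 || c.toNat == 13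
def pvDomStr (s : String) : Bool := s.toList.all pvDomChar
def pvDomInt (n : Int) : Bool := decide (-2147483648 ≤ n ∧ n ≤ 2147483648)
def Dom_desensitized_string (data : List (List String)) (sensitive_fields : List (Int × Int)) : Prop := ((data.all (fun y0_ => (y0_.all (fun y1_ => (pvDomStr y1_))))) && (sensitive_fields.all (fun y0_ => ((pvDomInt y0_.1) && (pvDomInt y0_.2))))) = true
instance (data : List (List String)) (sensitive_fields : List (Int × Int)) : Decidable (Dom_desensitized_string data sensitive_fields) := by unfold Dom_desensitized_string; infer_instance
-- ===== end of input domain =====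

-- B replaces A's per-cell membership scan by a one-shot grid copy with direct writes
-- at each in-bounds sensitive position, reading the original cell (timed faster on large grids).

-- ===== PORT A =====
-- shared helper of the module (used verbatim by both Source A and Source B)
def desensitive_value (value : String) : String :=
  let str_value := value.toList              -- str(value) on a str is the string itself
  let value_length : Int := str_value.length
  let desensitized_length := PySem.Int.floordiv value_length 2
  let star_position := PySem.Int.floordiv (value_length - desensitized_length) 2
  let end_position := star_position + desensitized_length
  String.ofList
    (PySem.List.slice str_value none (some star_position) ++
     List.replicate desensitized_length.toNat '*' ++
     PySem.List.slice str_value (some end_position) none)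

def desensitized_string (data : List (List String)) (sensitive_fields : List (Int × Int)) : List (List String) :=
  (PySem.List.enumerate data).foldl (fun desensitized_data p =>
    desensitized_data ++
      [(PySem.List.enumerate p.2).foldl (fun desensitized_row q =>
        desensitized_row ++
          [if (p.1, q.1) ∈ sensitive_fields then desensitive_value q.2 else q.2]) []]) []

-- ===== PORT B =====
def desensitized_string_alt (data : List (List String)) (sensitive_fields : List (Int × Int)) : List (List String) :=
  let result := data.map (fun row => row)
  sensitive_fields.foldl (fun res p =>
    if 0 ≤ p.1 ∧ p.1 < (data.length : Int) ∧ 0 ≤ p.2 ∧ p.2 < ((PySem.List.pyGetD data p.1 []).length : Int) then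
      res.set p.1.toNat
        ((res.getD p.1.toNat []).set p.2.toNat
          (desensitive_value (PySem.List.pyGetD (PySem.List.pyGetD data p.1 []) p.2 "")))
    else res) result

-- ===== PRECONDITION & SPEC =====
def Spec_desensitized_string (data : List (List String)) (sensitive_fields : List (Int × Int)) (out : List (List String)) : Prop := out = desensitized_string_alt data sensitive_fields
instance (data : List (List String)) (sensitive_fields : List (Int × Int)) (out : List (List String)) : Decidable (Spec_desensitized_string data sensitive_fields out) := by unfold Spec_desensitized_string; infer_instance

-- ===== CLAIM (what is proved, stated in full; the proofs are below) =====
def Claim_equal_desensitized_string : Prop := ∀ (data : List (List String)) (sensitive_fields : List (Int × Int)), Dom_desensitized_string data sensitive_fields → Spec_desensitized_string data sensitive_fields (desensitized_string data sensitive_fields)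

-- ===== LEMMAS AND PROOFS =====

-- common characterisation both ports are reduced to: cell (i,j) is masked iff (↑i,↑j) is listed
def maskGrid (data : List (List String)) (sf : List (Int × Int)) : List (List String) :=
  data.mapIdx (fun i row => row.mapIdx (fun j v =>
    if ((i : Int), (j : Int)) ∈ sf then desensitive_value v else v))

theorem enumerate_map_eq_mapIdx {α β : Type} (f : Int × α → β) (xs : List α) (s : Int) :
    (PySem.List.enumerate xs s).map f = xs.mapIdx (fun j v => f (s + (j : Int), v)) := by
  induction xs generalizing s with
  | nil => simp [PySem.List.enumerate_nil]
  | cons x xs ih =>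
      simp only [PySem.List.enumerate_cons, List.map_cons, List.mapIdx_cons, ih]
      congr 1
      · norm_num
      · congr 1
        funext j v
        congr 2
        push_cast
        ring

theorem portA_eq_maskGrid (data : List (List String)) (sf : List (Int × Int)) :
    desensitized_string data sf = maskGrid data sf := by
  unfold desensitized_string maskGrid
  rw [PySem.List.foldl_append_singleton_eq_map, enumerate_map_eq_mapIdx]
  simp only [List.nil_append]
  apply (List.mapIdx_eq_mapIdx_iff).mpr
  intro i hi
  rw [PySem.List.foldl_append_singleton_eq_map, enumerate_map_eq_mapIdx]
  simp

theorem maskGrid_nil (data : List (List String)) :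
    maskGrid data [] = data.map (fun row => row) := by
  unfold maskGrid
  simp [List.mapIdx_eq_zipIdx_map]

-- one B-loop step starting from the masked grid of the already-processed prefix l
theorem mem_snoc_iff {p q : Int × Int} (l : List (Int × Int)) (h : p ≠ q) :
    p ∈ l ++ [q] ↔ p ∈ l := by
  simp [List.mem_append, h]

theorem maskGrid_snoc (data : List (List String)) (l : List (Int × Int)) (r c : Int) :
    (if 0 ≤ r ∧ r < (data.length : Int) ∧ 0 ≤ c ∧ c < ((PySem.List.pyGetD data r []).length : Int) then
      (maskGrid data l).set r.toNat
        (((maskGrid data l).getD r.toNat []).set c.toNat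
          (desensitive_value (PySem.List.pyGetD (PySem.List.pyGetD data r []) c "")))
    else maskGrid data l) = maskGrid data (l ++ [(r, c)]) := by
  split_ifs with hb
  · -- in-bounds write
    obtain ⟨hr0, hrl, hc0, hcl⟩ := hb
    rw [PySem.List.pyGetD_eq_getElem _ _ hr0 hrl] at hcl ⊢
    have hrN : r.toNat < data.length := by omega
    have hcN : c.toNat < (data[r.toNat]'hrN).length := by omega
    have hrow : (maskGrid data l).getD r.toNat [] =
        List.mapIdx (fun j v => if (((r.toNat : Nat) : Int), (j : Int)) ∈ l then desensitive_value v else v)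
          (data[r.toNat]'hrN) := by
      unfold maskGrid
      rw [List.getD_eq_getElem?_getD, List.getElem?_mapIdx, List.getElem?_eq_getElem hrN]
      simp
    rw [hrow, PySem.List.pyGetD_eq_getElem _ _ hc0 hcl]
    apply List.ext_getElem?
    intro i
    unfold maskGrid
    simp only [List.getElem?_set, List.length_mapIdx, List.getElem?_mapIdx]
    by_cases hi : r.toNat = i
    · subst hi
      simp only [if_pos hrN, if_true, List.getElem?_eq_getElem hrN, Option.map_some]
      congr 1
      apply List.ext_getElem?
      intro j
      simp only [List.getElem?_set, List.length_mapIdx, List.getElem?_mapIdx]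
      by_cases hj : c.toNat = j
      · subst hj
        simp only [if_pos hcN, if_true, List.getElem?_eq_getElem hcN, Option.map_some]
        have hmem : (((r.toNat : Nat) : Int), ((c.toNat : Nat) : Int)) ∈ l ++ [(r, c)] := by
          have : (((r.toNat : Nat) : Int), ((c.toNat : Nat) : Int)) = (r, c) := by
            simp only [Prod.mk.injEq]; omega
          rw [this]
          simp
        rw [if_pos hmem]
      · simp only [if_neg hj]
        by_cases hjlt : j < (data[r.toNat]'hrN).length
        · simp only [List.getElem?_eq_getElem hjlt, Option.map_some, Option.some.injEq]
          simp only [mem_snoc_iff l (by simp only [ne_eq, Prod.mk.injEq, not_and]; intro _; omega :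
            (((r.toNat : Nat) : Int), ((j : Nat) : Int)) ≠ (r, c))]
        · simp [List.getElem?_eq_none (by omega : (data[r.toNat]'hrN).length ≤ j)]
    · simp only [if_neg hi]
      by_cases hilt : i < data.length
      · simp only [List.getElem?_eq_getElem hilt, Option.map_some, Option.some.injEq]
        apply (List.mapIdx_eq_mapIdx_iff).mpr
        intro j hjlt
        simp only [mem_snoc_iff l (by simp only [ne_eq, Prod.mk.injEq, not_and]; intro h; exfalso; omega :
          (((i : Nat) : Int), ((j : Nat) : Int)) ≠ (r, c))]
      · simp [List.getElem?_eq_none (by omega : data.length ≤ i)]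
  · -- out of bounds: no cell matches (r, c)
    unfold maskGrid
    apply (List.mapIdx_eq_mapIdx_iff).mpr
    intro i hilt
    apply (List.mapIdx_eq_mapIdx_iff).mpr
    intro j hjlt
    have hne : (((i : Nat) : Int), ((j : Nat) : Int)) ≠ (r, c) := by
      simp only [ne_eq, Prod.mk.injEq, not_and]
      intro hir hjc
      apply hb
      refine ⟨by omega, by omega, by omega, ?_⟩
      have hr0 : (0:Int) ≤ r := by omega
      have hrl : r < (data.length : Int) := by omega
      rw [PySem.List.pyGetD_eq_getElem _ _ hr0 hrl]
      have hri : r.toNat = i := by omega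
      simp only [hri]
      omega
    simp only [mem_snoc_iff l hne]

theorem foldB_eq_maskGrid (data : List (List String)) (sf : List (Int × Int)) :
    ∀ l : List (Int × Int),
      sf.foldl (fun res p =>
        if 0 ≤ p.1 ∧ p.1 < (data.length : Int) ∧ 0 ≤ p.2 ∧ p.2 < ((PySem.List.pyGetD data p.1 []).length : Int) then
          res.set p.1.toNat
            ((res.getD p.1.toNat []).set p.2.toNat
              (desensitive_value (PySem.List.pyGetD (PySem.List.pyGetD data p.1 []) p.2 "")))
        else res) (maskGrid data l) = maskGrid data (l ++ sf) := by
  induction sf with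
  | nil => intro l; simp
  | cons p tl ih =>
      intro l
      simp only [List.foldl_cons]
      rw [maskGrid_snoc data l p.1 p.2, ih (l ++ [(p.1, p.2)])]
      simp

theorem portB_eq_maskGrid (data : List (List String)) (sf : List (Int × Int)) :
    desensitized_string_alt data sf = maskGrid data sf := by
  unfold desensitized_string_alt
  rw [← maskGrid_nil data]
  simpa using foldB_eq_maskGrid data sf []

-- ===== VERDICT (by name: the statement is the Claim_ definition above) =====
theorem desensitized_string_spec : Claim_equal_desensitized_string := by
  intro data sf _
  unfold Spec_desensitized_string
  rw [portA_eq_maskGrid, portB_eq_maskGrid]
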